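-- pv_equiv track=rewrite | github.com/Naveed-Naqi/SHSATGrader | GeneralizeTest.py | formatID
-- ===== SOURCE A (Python) =====
-- def formatID(id_matrix):
--
--     id_number = 0
--
--     #The number of columns in the matrix
--     minimum_width = len(id_matrix[0])
--     filler = "0"
--
--     place_value = minimum_width - 1
--
--     for i in range(len(id_matrix)):
--         for j in range(len(id_matrix[i])):
--             if(id_matrix[i][j] == 1):
--                 id_number += (i * (10**(place_value - j)))
--
--     id_number = f'{id_number:{filler}{minimum_width}}'
--
--     return id_number
-- ===== SOURCE B (Python) =====
-- def formatID(id_matrix):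
--     # Column-major Horner scheme: one running accumulator, no explicit powers of 10.
--     width = len(id_matrix[0])
--     id_number = 0
--     for j in range(width):
--         colsum = sum(i for i, row in enumerate(id_matrix) if j < len(row) and row[j] == 1)
--         id_number = id_number * 10 + colsum
--     return str(id_number).zfill(width)
-- ===== Notes on version B (the rewrite author's own statement) =====
-- stated objective: alternative
-- what changed: Row-major double loop summing independent i*10**(place_value-j) terms is replaced by a column-major Horner scheme: for each column, sum the row indices holding a 1, then fold with id*10+colsum, so no powers of 10 are ever computed.
-- outside the precondition, e.g. on formatID([[0], [1, 1]]): A returns '1.1', B returns '1'; on formatID([]): A raises IndexError, B raises IndexError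
import Mathlib
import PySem

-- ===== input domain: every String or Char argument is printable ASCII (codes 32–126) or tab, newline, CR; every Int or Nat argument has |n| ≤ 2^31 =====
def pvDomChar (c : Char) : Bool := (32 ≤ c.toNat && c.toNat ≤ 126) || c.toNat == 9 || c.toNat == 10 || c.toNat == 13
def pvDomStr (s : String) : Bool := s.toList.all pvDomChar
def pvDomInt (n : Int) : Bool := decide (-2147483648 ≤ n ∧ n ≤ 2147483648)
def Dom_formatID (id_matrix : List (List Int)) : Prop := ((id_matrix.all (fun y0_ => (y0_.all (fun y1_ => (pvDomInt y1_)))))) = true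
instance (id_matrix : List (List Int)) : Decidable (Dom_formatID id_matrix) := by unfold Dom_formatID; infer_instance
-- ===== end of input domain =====

-- B replaces A's row-major sum of power-weighted terms by a column-major Horner fold (alternative decomposition, same cost).

-- ===== PORT A =====
-- Literal port of A. Python's 10**(place_value-j) is exact here only for j ≤ place_value
-- (otherwise CPython produces a float); Pre_formatID restricts to inputs where the guarded
-- branch is only reached with j ≤ place_value, so '^ (…).toNat' is exact on Pre_.
def formatID (id_matrix : List (List Int)) : String :=
  let minimum_width : Int := PySem.List.len (PySem.List.pyGetD id_matrix 0 [])
  let place_value : Int := minimum_width - 1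
  let id_number : Int :=
    (PySem.List.pyRange 0 (PySem.List.len id_matrix) 1).foldl (fun acc i =>
      let row := PySem.List.pyGetD id_matrix i []
      (PySem.List.pyRange 0 (PySem.List.len row) 1).foldl (fun acc j =>
        if PySem.List.pyGetD row j 0 = 1 then acc + i * 10 ^ (place_value - j).toNat else acc)
        acc) 0
  -- f'{id_number:0{minimum_width}}' : for a nonnegative int this is zero-padding to the width
  PySem.Str.zfill (PySem.Int.toStr id_number) minimum_width

-- ===== PORT B =====
def formatID_alt (id_matrix : List (List Int)) : String :=
  let width : Int := PySem.List.len (PySem.List.pyGetD id_matrix 0 [])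
  let id_number : Int :=
    (PySem.List.pyRange 0 width 1).foldl (fun acc j =>
      acc * 10 +
        ((PySem.List.enumerate id_matrix 0).map (fun p =>
          if j < PySem.List.len p.2 ∧ PySem.List.pyGetD p.2 j 0 = 1 then p.1 else 0)).sum) 0
  PySem.Str.zfill (PySem.Int.toStr id_number) width

-- ===== PRECONDITION & SPEC =====
-- Pre_ excludes the empty matrix (A raises IndexError) and matrices holding a 1 at a column
-- index ≥ the width of row 0, where A's 10**(negative exponent) turns the result into a
-- float-formatted string such as '1.1' (not an int-format value).
def Pre_formatID (id_matrix : List (List Int)) : Prop :=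
  id_matrix ≠ [] ∧
  ∀ row ∈ id_matrix, ∀ j ∈ List.range row.length,
    row.getD j 0 = 1 → j < (id_matrix.headD []).length
instance (id_matrix : List (List Int)) : Decidable (Pre_formatID id_matrix) := by
  unfold Pre_formatID; infer_instance
def pvWitness_formatID : List (List Int) := [[0, 1], [1, 0], [1, 1]]
def Spec_formatID (id_matrix : List (List Int)) (out : String) : Prop := out = formatID_alt id_matrix
instance (id_matrix : List (List Int)) (out : String) : Decidable (Spec_formatID id_matrix out) := by unfold Spec_formatID; infer_instance

-- ===== CLAIM (what is proved, stated in full; the proofs are below) =====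
def Claim_equal_formatID : Prop := ∀ (id_matrix : List (List Int)), Dom_formatID id_matrix → Pre_formatID id_matrix → Spec_formatID id_matrix (formatID id_matrix)

-- ===== LEMMAS AND PROOFS =====

theorem pv_sum_map_pyRange (f : Int → Int) (n : Nat) :
    ((PySem.List.pyRange 0 (n:Int) 1).map f).sum = ∑ k ∈ Finset.range n, f (k:Int) := by
  induction n with
  | zero => simp [PySem.List.pyRange_one_eq_nil]
  | succ n ih =>
    have h : ((n+1 : Nat) : Int) = (n:Int) + 1 := by push_cast; ring
    rw [h, PySem.List.pyRange_one_succ_right (Int.natCast_nonneg n), List.map_append,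
        List.sum_append, ih, Finset.sum_range_succ]
    simp


theorem pv_foldl_guard {α : Type} (L : List α) (P : α → Prop) [DecidablePred P] (f : α → Int) (a : Int) :
    L.foldl (fun acc x => if P x then acc + f x else acc) a
      = a + (L.map (fun x => if P x then f x else 0)).sum := by
  have h : (fun acc x => if P x then acc + f x else acc)
       = (fun (acc : Int) x => acc + (if P x then f x else 0)) := by
    funext acc x; split <;> simp
  rw [h, PySem.List.foldl_add]


theorem pv_getD_ne_one (row : List Int) (j : Nat) (h : ¬ j < row.length) : row.getD j 0 = 0 :=
  List.getD_eq_default _ _ (by omega)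


theorem pv_row_sum (row : List Int) (v : Int) (w : Nat)
    (hrow : ∀ j ∈ List.range row.length, row.getD j 0 = 1 → j < w) :
    ∑ j ∈ Finset.range row.length,
        (if row.getD j 0 = 1 then v * 10 ^ (((w:Int) - 1 - (j:Nat)).toNat) else 0)
      = ∑ j ∈ Finset.range w, (if row.getD j 0 = 1 then v else 0) * 10 ^ (w - 1 - j) := by
  have hG : ∀ j : Nat, (if row.getD j 0 = 1 then v * 10 ^ (((w:Int) - 1 - (j:Nat)).toNat) else 0)
      = (if row.getD j 0 = 1 then v else 0) * 10 ^ (w - 1 - j) := by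
    intro j
    by_cases h : row.getD j 0 = 1
    · have hjl : j < row.length := by
        by_contra hc
        have := pv_getD_ne_one row j hc
        omega
      have hjw : j < w := hrow j (List.mem_range.mpr hjl) h
      have he : ((w:Int) - 1 - (j:Nat)).toNat = w - 1 - j := by omega
      rw [if_pos h, if_pos h, he]
    · rw [if_neg h, if_neg h, zero_mul]
  simp only [hG]
  have hvan : ∀ j : Nat, w ≤ j ∨ row.length ≤ j →
      (if row.getD j 0 = 1 then v else 0) * 10 ^ (w - 1 - j) = 0 := by
    intro j hj
    by_cases h : row.getD j 0 = 1
    · rcases hj with hj | hj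
      · have hjl : j < row.length := by
          by_contra hc
          have := pv_getD_ne_one row j hc
          omega
        have := hrow j (List.mem_range.mpr hjl) h
        omega
      · have := pv_getD_ne_one row j (by omega)
        omega
    · rw [if_neg h, zero_mul]
  have h1 : ∑ j ∈ Finset.range row.length, (if row.getD j 0 = 1 then v else 0) * 10 ^ (w - 1 - j)
      = ∑ j ∈ Finset.range (max row.length w), (if row.getD j 0 = 1 then v else 0) * 10 ^ (w - 1 - j) := by
    refine Finset.sum_subset ?_ ?_
    · intro x hx
      simp only [Finset.mem_range] at *
      omega
    · intro j hj hnj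
      exact hvan j (Or.inr (by simpa using hnj))
  have h2 : ∑ j ∈ Finset.range w, (if row.getD j 0 = 1 then v else 0) * 10 ^ (w - 1 - j)
      = ∑ j ∈ Finset.range (max row.length w), (if row.getD j 0 = 1 then v else 0) * 10 ^ (w - 1 - j) := by
    refine Finset.sum_subset ?_ ?_
    · intro x hx
      simp only [Finset.mem_range] at *
      omega
    · intro j hj hnj
      exact hvan j (Or.inl (by simpa using hnj))
  rw [h1, h2]

theorem pv_horner (c : Int → Int) (w : Nat) :
    (PySem.List.pyRange 0 (w:Int) 1).foldl (fun acc j => acc * 10 + c j) 0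
      = ∑ j ∈ Finset.range w, c (j:Int) * 10 ^ (w - 1 - j) := by
  induction w with
  | zero => simp [PySem.List.pyRange_one_eq_nil]
  | succ w ih =>
    have h : ((w+1 : Nat) : Int) = (w:Int) + 1 := by push_cast; ring
    rw [h, PySem.List.pyRange_one_succ_right (Int.natCast_nonneg w), List.foldl_append, ih,
        Finset.sum_range_succ]
    have hsum : ∑ j ∈ Finset.range w, c (j:Int) * 10 ^ (w + 1 - 1 - j)
        = (∑ j ∈ Finset.range w, c (j:Int) * 10 ^ (w - 1 - j)) * 10 := by
      rw [Finset.sum_mul]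
      refine Finset.sum_congr rfl (fun j hj => ?_)
      have hj' : j < w := Finset.mem_range.mp hj
      have he : w + 1 - 1 - j = (w - 1 - j) + 1 := by omega
      rw [he, pow_succ]; ring
    have hw : w + 1 - 1 - w = 0 := by omega
    rw [hsum, hw]
    simp [List.foldl]

theorem formatID_nums_eq (m : List (List Int)) (hpre : Pre_formatID m) :
    (PySem.List.pyRange 0 (PySem.List.len m) 1).foldl (fun acc i =>
      let row := PySem.List.pyGetD m i []
      (PySem.List.pyRange 0 (PySem.List.len row) 1).foldl (fun acc j =>
        if PySem.List.pyGetD row j 0 = 1 then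
          acc + i * 10 ^ ((PySem.List.len (PySem.List.pyGetD m 0 []) - 1) - j).toNat
        else acc) acc) 0
    = (PySem.List.pyRange 0 (PySem.List.len (PySem.List.pyGetD m 0 [])) 1).foldl (fun acc j =>
        acc * 10 +
          ((PySem.List.enumerate m 0).map (fun p =>
            if j < PySem.List.len p.2 ∧ PySem.List.pyGetD p.2 j 0 = 1 then p.1 else 0)).sum) 0 := by
  obtain ⟨hne, hP⟩ := hpre
  have h0 : PySem.List.pyGetD m 0 [] = m.getD 0 [] := by
    cases m <;> simp [PySem.List.pyGetD, PySem.List.pyGet?, PySem.List.pyIdx?]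
  have hhd : m.headD [] = m.getD 0 [] := by cases m <;> rfl
  rw [hhd] at hP
  simp only [h0, PySem.List.len_eq]
  -- abbreviations
  have hmem : ∀ k : Nat, k < m.length → m.getD k [] ∈ m := fun k hk => by
    rw [List.getD_eq_getElem _ _ hk]; exact List.getElem_mem hk
  -- A side
  have hA :
      (PySem.List.pyRange 0 (m.length:Int) 1).foldl (fun acc i =>
        let row := PySem.List.pyGetD m i []
        (PySem.List.pyRange 0 (row.length:Int) 1).foldl (fun acc j =>
          if PySem.List.pyGetD row j 0 = 1 then
            acc + i * 10 ^ ((((m.getD 0 []).length:Int) - 1) - j).toNat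
          else acc) acc) 0
      = ∑ j ∈ Finset.range (m.getD 0 []).length,
          (∑ i ∈ Finset.range m.length,
            (if (m.getD i []).getD j 0 = 1 then (i:Int) else 0)) * 10 ^ ((m.getD 0 []).length - 1 - j) := by
    rw [PySem.List.foldl_congr_mem _ _
        (fun acc i => acc + ((PySem.List.pyRange 0 (((PySem.List.pyGetD m i []).length:Int)) 1).map
          (fun j => if PySem.List.pyGetD (PySem.List.pyGetD m i []) j 0 = 1 then
            i * 10 ^ ((((m.getD 0 []).length:Int) - 1) - j).toNat else 0)).sum) 0
        (fun acc i _ => pv_foldl_guard _ _ _ acc)]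
    rw [PySem.List.foldl_add, zero_add, pv_sum_map_pyRange]
    have hinner : ∀ k ∈ Finset.range m.length,
        ((PySem.List.pyRange 0 (((PySem.List.pyGetD m (k:Int) []).length:Int)) 1).map
          (fun j => if PySem.List.pyGetD (PySem.List.pyGetD m (k:Int) []) j 0 = 1 then
            (k:Int) * 10 ^ ((((m.getD 0 []).length:Int) - 1) - j).toNat else 0)).sum
        = ∑ j ∈ Finset.range (m.getD 0 []).length,
            (if (m.getD k []).getD j 0 = 1 then (k:Int) else 0) * 10 ^ ((m.getD 0 []).length - 1 - j) := by
      intro k hk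
      have hk' : k < m.length := Finset.mem_range.mp hk
      rw [PySem.List.pyGetD_natCast, pv_sum_map_pyRange]
      simp only [PySem.List.pyGetD_natCast]
      exact pv_row_sum _ _ _ (hP _ (hmem k hk'))
    rw [Finset.sum_congr rfl hinner, Finset.sum_comm]
    exact Finset.sum_congr rfl (fun j hj => (Finset.sum_mul _ _ _).symm)
  have hB :
      (PySem.List.pyRange 0 (((m.getD 0 []).length:Int)) 1).foldl (fun acc j =>
        acc * 10 +
          ((PySem.List.enumerate m 0).map (fun p =>
            if j < (p.2.length:Int) ∧ PySem.List.pyGetD p.2 j 0 = 1 then p.1 else 0)).sum) 0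
      = ∑ j ∈ Finset.range (m.getD 0 []).length,
          (∑ i ∈ Finset.range m.length,
            (if (m.getD i []).getD j 0 = 1 then (i:Int) else 0)) * 10 ^ ((m.getD 0 []).length - 1 - j) := by
    rw [pv_horner]
    refine Finset.sum_congr rfl (fun j hj => ?_)
    refine congrArg (· * _) ?_
    rw [PySem.List.enumerate_eq_map_pyRange m [], List.map_map]
    simp only [PySem.List.len_eq]
    rw [pv_sum_map_pyRange]
    refine Finset.sum_congr rfl (fun k hk => ?_)
    simp only [Function.comp, PySem.List.pyGetD_natCast]
    refine if_congr ?_ rfl rfl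
    constructor
    · exact fun h => h.2
    · intro h
      refine ⟨?_, h⟩
      by_contra hc
      have h0' : (m.getD k []).getD j 0 = 0 :=
        pv_getD_ne_one _ _ (fun hl => hc (by exact_mod_cast hl))
      omega
  rw [hA]
  exact hB.symm

-- ===== VERDICT (by name: the statement is the Claim_ definition above) =====
theorem formatID_spec : Claim_equal_formatID := by
  intro m _ hpre
  unfold Spec_formatID formatID formatID_alt
  simp only []
  rw [formatID_nums_eq m hpre]
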